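-- pv_equiv track=rewrite | github.com/sarahjwang/Python | hw7-solo.py | isLegalMove
-- ===== SOURCE A (Python) =====
-- def isLegalMove(circle1, circle2):
--     row1, col1 = circle1
--     row2, col2 = circle2
--     dirs = [(-1, 0),( 0, -1),( 0, +1),(+1, 0)]
--     for direction in dirs:
--         if row1 + direction[0] == row2 and col1 + direction[1] == col2:
--             return True
--             #returns True if the move is 1 left, right, top or bottom
--     return False
-- ===== SOURCE B (Python) =====
-- def isLegalMove(circle1, circle2):
--     row1, col1 = circle1
--     row2, col2 = circle2
--     dr = row2 - row1
--     dc = col2 - col1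
--     return (abs(dr) == 1 and dc == 0) or (dr == 0 and abs(dc) == 1)
-- ===== Notes on version B (the rewrite author's own statement) =====
-- stated objective: simpler
-- what changed: Replaced the loop over a direction list with a closed-form predicate on coordinate differences.
import Mathlib
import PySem

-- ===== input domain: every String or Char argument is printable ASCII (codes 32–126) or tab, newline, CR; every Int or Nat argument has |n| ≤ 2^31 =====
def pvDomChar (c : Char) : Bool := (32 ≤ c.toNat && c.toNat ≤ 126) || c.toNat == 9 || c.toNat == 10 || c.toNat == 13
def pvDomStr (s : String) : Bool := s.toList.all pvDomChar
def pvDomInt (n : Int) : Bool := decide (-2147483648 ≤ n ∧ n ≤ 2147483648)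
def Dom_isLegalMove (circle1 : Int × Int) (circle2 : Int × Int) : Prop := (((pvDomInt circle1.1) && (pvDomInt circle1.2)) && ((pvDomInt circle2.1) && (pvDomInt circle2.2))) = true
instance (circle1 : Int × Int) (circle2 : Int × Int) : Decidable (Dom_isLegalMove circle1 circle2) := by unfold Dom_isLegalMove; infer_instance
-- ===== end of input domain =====

-- B replaces A's loop over a 4-element direction list by the closed-form adjacency predicate on coordinate differences (objective: simpler).


-- ===== PORT A =====
-- Literal port of A: iterate over the direction list, return true on first match.
def isLegalMoveLoop (row1 col1 row2 col2 : Int) : List (Int × Int) → Bool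
  | [] => false
  | d :: rest =>
    if row1 + d.1 == row2 && col1 + d.2 == col2 then true
    else isLegalMoveLoop row1 col1 row2 col2 rest

def isLegalMove (circle1 : Int × Int) (circle2 : Int × Int) : Bool :=
  let row1 := circle1.1; let col1 := circle1.2
  let row2 := circle2.1; let col2 := circle2.2
  isLegalMoveLoop row1 col1 row2 col2 [(-1, 0), (0, -1), (0, 1), (1, 0)]

-- ===== PORT B =====
-- Port of B: closed-form predicate on the coordinate differences.
def isLegalMove_alt (circle1 : Int × Int) (circle2 : Int × Int) : Bool :=
  let dr := circle2.1 - circle1.1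
  let dc := circle2.2 - circle1.2
  ((dr.natAbs == 1) && (dc == 0)) || ((dr == 0) && (dc.natAbs == 1))

-- ===== PRECONDITION & SPEC =====
def Spec_isLegalMove (circle1 : Int × Int) (circle2 : Int × Int) (out : Bool) : Prop := out = isLegalMove_alt circle1 circle2
instance (circle1 : Int × Int) (circle2 : Int × Int) (out : Bool) : Decidable (Spec_isLegalMove circle1 circle2 out) := by unfold Spec_isLegalMove; infer_instance

-- ===== CLAIM (what is proved, stated in full; the proofs are below) =====
def Claim_equal_isLegalMove : Prop := ∀ (circle1 : Int × Int) (circle2 : Int × Int), Dom_isLegalMove circle1 circle2 → Spec_isLegalMove circle1 circle2 (isLegalMove circle1 circle2)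

-- ===== LEMMAS AND PROOFS =====

-- ===== VERDICT (by name: the statement is the Claim_ definition above) =====
theorem isLegalMove_spec : Claim_equal_isLegalMove := by
  intro ⟨r1, c1⟩ ⟨r2, c2⟩ _
  unfold Spec_isLegalMove isLegalMove isLegalMove_alt
  rw [Bool.eq_iff_iff]
  simp only [isLegalMoveLoop, Bool.and_eq_true, Bool.or_eq_true, beq_iff_eq]
  split_ifs <;>
    first
      | exact iff_of_true rfl (by omega)
      | (simp only [false_iff, not_or, not_and]; omega)
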